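-- pv_equiv track=rewrite | github.com/JHDeerin/adventOfCode2022 | src/day1/main.py | parse_elf_inventories
-- ===== SOURCE A (Python) =====
-- from typing import List
--
-- def parse_elf_inventories(input: List[str]) -> List[List[int]]:
--     elf_inventories = []
--     current_elf = []
--     for item in input:
--         try:
--             current_elf.append(int(item))
--         except ValueError:
--             elf_inventories.append(current_elf)
--             current_elf = []
--     if current_elf:
--         elf_inventories.append(current_elf)
--     return elf_inventories
-- ===== SOURCE B (Python) =====
-- from typing import List
--
-- def parse_elf_inventories(input: List[str]) -> List[List[int]]:
--     # Index-table decomposition: find separator positions first, then slice.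
--     seps = []
--     for i, item in enumerate(input):
--         try:
--             int(item)
--         except ValueError:
--             seps.append(i)
--     result = []
--     start = 0
--     for s in seps:
--         result.append([int(x) for x in input[start:s]])
--         start = s + 1
--     tail = input[start:]
--     if tail:
--         result.append([int(x) for x in tail])
--     return result
-- ===== Notes on version B (the rewrite author's own statement) =====
-- stated objective: alternative
-- what changed: Replaces A's single-pass running-accumulator loop by a two-phase index-table decomposition: first collect the positions of all non-integer separator lines, then cut the parsed groups out of the input by slicing between consecutive separator indices.
import Mathlib
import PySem

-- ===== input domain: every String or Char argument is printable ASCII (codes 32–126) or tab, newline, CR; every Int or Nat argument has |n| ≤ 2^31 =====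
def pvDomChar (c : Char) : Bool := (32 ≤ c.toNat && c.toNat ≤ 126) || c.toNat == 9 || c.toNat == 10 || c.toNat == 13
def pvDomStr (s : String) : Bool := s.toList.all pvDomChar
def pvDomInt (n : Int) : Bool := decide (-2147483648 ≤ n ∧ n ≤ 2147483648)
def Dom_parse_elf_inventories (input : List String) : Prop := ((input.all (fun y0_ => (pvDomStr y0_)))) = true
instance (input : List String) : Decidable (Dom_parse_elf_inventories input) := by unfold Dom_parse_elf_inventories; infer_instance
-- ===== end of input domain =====

-- B replaces A's running-accumulator single pass by a separator-index table followed by slicing; objective: alternative decomposition (same cost).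

-- ===== PORT A =====
def pvAStep (st : List (List Int) × List Int) (item : String) : List (List Int) × List Int :=
  match PySem.Int.ofStr? item with
  | some n => (st.1, st.2 ++ [n])   -- current_elf.append(int(item))
  | none   => (st.1 ++ [st.2], []) -- except ValueError: flush current_elf

def parse_elf_inventories (input : List String) : List (List Int) :=
  let st := input.foldl pvAStep ([], [])
  if st.2 ≠ [] then st.1 ++ [st.2] else st.1

-- ===== PORT B =====
-- int(x) on strings the index table guarantees to parse
def pvParseInt (s : String) : Int := (PySem.Int.ofStr? s).getD 0

-- phase 1: positions i where int(input[i]) raises ValueError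
def pvSeps : Nat → List String → List Nat
  | _, [] => []
  | i, x :: xs => if (PySem.Int.ofStr? x).isNone then i :: pvSeps (i + 1) xs else pvSeps (i + 1) xs

-- phase 2: cut groups out of input between consecutive separator indices
def pvBGo (input : List String) : List Nat → Nat → List (List Int) → List (List Int)
  | [], start, result =>
      let tail := PySem.List.slice input (some (start : Int)) none
      if tail ≠ [] then result ++ [tail.map pvParseInt] else result
  | s :: rest, start, result =>
      pvBGo input rest (s + 1)
        (result ++ [(PySem.List.slice input (some (start : Int)) (some (s : Int))).map pvParseInt])

def parse_elf_inventories_alt (input : List String) : List (List Int) :=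
  pvBGo input (pvSeps 0 input) 0 []

-- ===== PRECONDITION & SPEC =====
def Spec_parse_elf_inventories (input : List String) (out : List (List Int)) : Prop := out = parse_elf_inventories_alt input
instance (input : List String) (out : List (List Int)) : Decidable (Spec_parse_elf_inventories input out) := by unfold Spec_parse_elf_inventories; infer_instance

-- ===== CLAIM (what is proved, stated in full; the proofs are below) =====
def Claim_equal_parse_elf_inventories : Prop := ∀ (input : List String), Dom_parse_elf_inventories input → Spec_parse_elf_inventories input (parse_elf_inventories input)

-- ===== LEMMAS AND PROOFS =====

-- canonical recursive characterisation both programs are reduced to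
def pvGroups : List String → List Int → List (List Int)
  | [], cur => if cur ≠ [] then [cur] else []
  | x :: xs, cur =>
      match PySem.Int.ofStr? x with
      | some n => pvGroups xs (cur ++ [n])
      | none   => cur :: pvGroups xs []

theorem pvA_eq_groups (xs : List String) : ∀ (inv : List (List Int)) (cur : List Int),
    (let st := xs.foldl pvAStep (inv, cur);
     if st.2 ≠ [] then st.1 ++ [st.2] else st.1) = inv ++ pvGroups xs cur := by
  induction xs with
  | nil =>
      intro inv cur
      simp only [List.foldl_nil, pvGroups]
      split_ifs <;> simp_all
  | cons x xs ih =>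
      intro inv cur
      simp only [List.foldl_cons, pvGroups]
      cases h : PySem.Int.ofStr? x with
      | some n => simpa [pvAStep, h] using ih inv (cur ++ [n])
      | none => simp [pvAStep, h, ih (inv ++ [cur]) []]

theorem pvB_eq_groups (input : List String) : ∀ (xs : List String) (j start : Nat)
    (result : List (List Int)), start ≤ j → input.drop j = xs →
    pvBGo input (pvSeps j xs) start result
      = result ++ pvGroups xs (((input.drop start).take (j - start)).map pvParseInt) := by
  intro xs
  induction xs with
  | nil =>
      intro j start result hle hdrop
      have htail : (input.drop start).take (j - start) = input.drop start := by
        apply List.take_of_length_le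
        have : input.length ≤ j := by
          by_contra h
          have := List.drop_eq_nil_iff.mp hdrop
          omega
        simp; omega
      simp only [pvSeps, pvBGo, PySem.List.slice_from_natCast, htail, pvGroups]
      split_ifs with h1 h2 <;> simp_all
  | cons x xs ih =>
      intro j start result hle hdrop
      have hjlt : j < input.length := by
        by_contra h
        have : input.drop j = [] := List.drop_eq_nil_iff.mpr (by omega)
        simp [this] at hdrop
      have hdrop1 : input.drop (j + 1) = xs := by
        rw [← List.drop_drop]  -- drop 1 (drop j)
        simp [hdrop]
      have hgetx : input[j]? = some x := by
        have h0 : (List.drop j input)[0]? = input[j + 0]? := List.getElem?_drop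
        rw [hdrop] at h0
        simpa using h0.symm
      cases h : PySem.Int.ofStr? x with
      | none =>
          simp only [pvSeps, h, Option.isNone_none, if_true]
          simp only [pvBGo]
          rw [ih (j + 1) (j + 1) _ (le_refl _) hdrop1]
          simp only [Nat.sub_self, List.take_zero, List.map_nil]
          rw [PySem.List.slice_natCast]
          simp [pvGroups, h]
      | some n =>
          simp only [pvSeps, h, Option.isNone_some, Bool.false_eq_true, if_false]
          rw [ih (j + 1) start result (by omega) hdrop1]
          have hsucc : j + 1 - start = (j - start) + 1 := by omega
          have hidx : (input.drop start)[j - start]? = some x := by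
            rw [List.getElem?_drop]
            rwa [Nat.add_sub_cancel' hle]
          have htake : (input.drop start).take (j + 1 - start)
              = (input.drop start).take (j - start) ++ [x] := by
            rw [hsucc, List.take_add_one, hidx]
            rfl
          rw [htake]
          simp [pvGroups, h, pvParseInt]

-- ===== VERDICT (by name: the statement is the Claim_ definition above) =====
theorem parse_elf_inventories_spec : Claim_equal_parse_elf_inventories := by
  intro input _
  unfold Spec_parse_elf_inventories parse_elf_inventories parse_elf_inventories_alt
  rw [pvB_eq_groups input input 0 0 [] (le_refl 0) (by simp)]
  simpa using pvA_eq_groups input [] []
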